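-- pv_equiv track=rewrite | github.com/seongjo-seo/Baekjoon | 프로그래머스/unrated/181932. 코드 처리하기/코드 처리하기.py | solution
-- ===== SOURCE A (Python) =====
-- def solution(code):
--     answer = ''
--     mode = 0
--
--     for idx in range(len(code)):
--         if mode == 0:
--             if idx % 2 == 0 and code[idx] != '1':
--                 answer += code[idx]
--             elif code[idx] == '1':
--                 mode = 1
--         elif mode == 1:
--             if idx % 2 == 1 and code[idx] != '1':
--                 answer += code[idx]
--             elif code[idx] == '1':
--                 mode = 0
--     if len(answer) <= 0:
--         answer = "EMPTY"
--     return answer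
-- ===== SOURCE B (Python) =====
-- def solution(code):
--     # pass 1: table of prefix parities (parity[i] = number of '1' in code[:i+1], mod 2)
--     parity = []
--     t = 0
--     for c in code:
--         if c == '1':
--             t += 1
--         parity.append(t % 2)
--     # pass 2: stateless filter against the table
--     answer = ''.join(c for idx, c in enumerate(code)
--                      if c != '1' and idx % 2 == parity[idx])
--     return answer if answer else "EMPTY"
-- ===== Notes on version B (the rewrite author's own statement) =====
-- stated objective: alternative
-- what changed: A's single scan that toggles a mode flag at each delimiter digit and branches per mode is replaced by two passes: first a table of prefix parities of the delimiter count, then a stateless filter keeping each non-delimiter character whose index parity equals its table entry.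
import Mathlib
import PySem

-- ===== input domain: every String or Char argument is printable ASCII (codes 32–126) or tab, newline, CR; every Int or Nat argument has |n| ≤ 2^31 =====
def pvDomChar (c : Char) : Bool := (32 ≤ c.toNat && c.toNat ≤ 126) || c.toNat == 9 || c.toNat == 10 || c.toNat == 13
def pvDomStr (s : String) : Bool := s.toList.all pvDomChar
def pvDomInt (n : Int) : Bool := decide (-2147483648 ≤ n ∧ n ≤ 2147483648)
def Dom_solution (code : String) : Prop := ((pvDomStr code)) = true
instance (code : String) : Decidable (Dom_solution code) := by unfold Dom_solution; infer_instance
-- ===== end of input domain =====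

-- B replaces A's toggled-mode state machine by two passes: a prefix-parity table, then a
-- stateless filter against it; objective: alternative (same O(n) cost, different shape).

-- ===== PORT A =====
-- A's loop `for idx in range(len(code))` with state (answer, mode); strings are carried
-- as their char lists, `answer += code[idx]` is `answer ++ [c]`.
def solution (code : String) : String :=
  let cs := code.toList
  let res : List Char × Int :=
    (PySem.List.pyRange 0 (PySem.List.len cs) 1).foldl
      (fun st idx =>
        let answer := st.1
        let mode := st.2
        if mode = 0 then
          if PySem.Int.mod idx 2 = 0 ∧ PySem.List.pyGetD cs idx ' ' ≠ '1' then
            (answer ++ [PySem.List.pyGetD cs idx ' '], mode)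
          else if PySem.List.pyGetD cs idx ' ' = '1' then (answer, 1)
          else (answer, mode)
        else if mode = 1 then
          if PySem.Int.mod idx 2 = 1 ∧ PySem.List.pyGetD cs idx ' ' ≠ '1' then
            (answer ++ [PySem.List.pyGetD cs idx ' '], mode)
          else if PySem.List.pyGetD cs idx ' ' = '1' then (answer, 0)
          else (answer, mode)
        else (answer, mode))
      ([], 0)
  if res.1.length ≤ 0 then "EMPTY" else String.ofList res.1

-- ===== PORT B =====
-- Source B pass 1: `parity`, the running count of '1' mod 2 after each position;
-- pass 2: the comprehension `c for idx, c in enumerate(code) if c != '1' and idx % 2 == parity[idx]`.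
def solution_alt (code : String) : String :=
  let cs := code.toList
  let parity : List Int :=
    (cs.foldl
      (fun (st : List Int × Int) c =>
        let t := if c = '1' then st.2 + 1 else st.2
        (st.1 ++ [PySem.Int.mod t 2], t))
      ([], 0)).1
  let kept := (cs.zipIdx).filter
    (fun p => p.1 ≠ '1' ∧ ((p.2 % 2 : Nat) : Int) = PySem.List.pyGetD parity (p.2 : Int) 0)
  let answer := kept.map Prod.fst
  if answer = [] then "EMPTY" else String.ofList answer

-- ===== PRECONDITION & SPEC =====
def Spec_solution (code : String) (out : String) : Prop := out = solution_alt code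
instance (code : String) (out : String) : Decidable (Spec_solution code out) := by unfold Spec_solution; infer_instance

-- ===== CLAIM (what is proved, stated in full; the proofs are below) =====
def Claim_equal_solution : Prop := ∀ (code : String), Dom_solution code → Spec_solution code (solution code)

-- ===== LEMMAS AND PROOFS =====

-- A's loop invariant: after the first n indices, A's answer is the filter of the first n
-- (index, char) pairs by "not '1' and index parity = parity of '1'-count of the strict
-- prefix", and A's mode is that parity for the whole processed prefix
theorem solution_loop_inv (cs : List Char) (n : Nat) (hn : n ≤ cs.length) :
    ((PySem.List.pyRange 0 (n : Int) 1).foldl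
      (fun (st : List Char × Int) idx =>
        let answer := st.1
        let mode := st.2
        if mode = 0 then
          if PySem.Int.mod idx 2 = 0 ∧ PySem.List.pyGetD cs idx ' ' ≠ '1' then
            (answer ++ [PySem.List.pyGetD cs idx ' '], mode)
          else if PySem.List.pyGetD cs idx ' ' = '1' then (answer, 1)
          else (answer, mode)
        else if mode = 1 then
          if PySem.Int.mod idx 2 = 1 ∧ PySem.List.pyGetD cs idx ' ' ≠ '1' then
            (answer ++ [PySem.List.pyGetD cs idx ' '], mode)
          else if PySem.List.pyGetD cs idx ' ' = '1' then (answer, 0)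
          else (answer, mode)
        else (answer, mode))
      ([], 0)) =
    ((((cs.take n).zipIdx).filter
        (fun p => p.1 ≠ '1' ∧ p.2 % 2 = (PySem.List.slice cs none (some (p.2 : Int))).count '1' % 2)).map Prod.fst,
     (((cs.take n).count '1' % 2 : Nat) : Int)) := by
  induction n with
  | zero => simp [PySem.List.pyRange_one_eq_nil]
  | succ n ih =>
    have hlt : n < cs.length := by omega
    have hcast : ((n+1 : Nat) : Int) = (n : Int) + 1 := by push_cast; ring
    rw [hcast, PySem.List.pyRange_one_succ_right (by positivity), List.foldl_append,
        ih (by omega), List.take_succ_eq_append_getElem hlt, List.zipIdx_append,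
        List.filter_append, List.map_append, List.count_append]
    have hget : PySem.List.pyGetD cs (n : Int) ' ' = cs[n] := by
      rw [PySem.List.pyGetD_of_nonneg] <;> simp [hlt]
    have hmod : PySem.Int.mod (n : Int) 2 = ((n % 2 : Nat) : Int) := by
      rw [PySem.Int.mod_eq_emod_of_pos (a := (n:Int)) (by norm_num)]; push_cast; ring
    have hslice : PySem.List.slice cs none (some (n : Int)) = cs.take n :=
      PySem.List.slice_to_natCast cs n
    simp only [List.foldl_cons, List.foldl_nil, List.zipIdx_nil, List.zipIdx_cons,
      List.length_take, Nat.min_eq_left (le_of_lt hlt), List.filter, hget, hmod,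
      List.count_cons, List.count_nil]
    rcases Nat.mod_two_eq_zero_or_one ((cs.take n).count '1') with hp | hp <;>
      rcases Nat.mod_two_eq_zero_or_one n with hq | hq <;>
      by_cases hc : cs[n] = '1' <;>
      simp [hc, hp, hq, hslice] <;>
      omega

-- B's first pass builds exactly the prefix-parity table
theorem solution_table_spec (cs : List Char) (acc : List Int) (t : Int) :
    (cs.foldl
      (fun (st : List Int × Int) c =>
        let t' := if c = '1' then st.2 + 1 else st.2
        (st.1 ++ [PySem.Int.mod t' 2], t'))
      (acc, t)) =
    (acc ++ (List.range cs.length).map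
        (fun i => PySem.Int.mod (t + ((cs.take (i+1)).count '1' : Int)) 2),
     t + (cs.count '1' : Int)) := by
  induction cs generalizing acc t with
  | nil => simp
  | cons c cs' ih =>
    simp only [List.foldl_cons, List.length_cons, List.range_succ_eq_map, List.map_cons,
      List.map_map, List.take_succ_cons, List.count_cons]
    rw [ih]
    by_cases hc : c = '1' <;> simp [hc, List.append_assoc] <;> try (constructor <;> omega)

-- on actual (char, index) pairs B's table test coincides with the strict-prefix parity test
theorem solution_filter_congr (cs : List Char) :
    (cs.zipIdx).filter
      (fun p => p.1 ≠ '1' ∧ ((p.2 % 2 : Nat) : Int) =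
        PySem.List.pyGetD ((cs.foldl
          (fun (st : List Int × Int) c =>
            let t := if c = '1' then st.2 + 1 else st.2
            (st.1 ++ [PySem.Int.mod t 2], t))
          ([], 0)).1) (p.2 : Int) 0) =
    (cs.zipIdx).filter
      (fun p => p.1 ≠ '1' ∧ p.2 % 2 = (PySem.List.slice cs none (some (p.2 : Int))).count '1' % 2) := by
  apply List.filter_congr
  intro p hp
  rw [List.mem_zipIdx_iff_getElem?] at hp
  obtain ⟨hlt, hpe⟩ := List.getElem?_eq_some_iff.mp hp
  rw [solution_table_spec, List.nil_append]
  have hgd : PySem.List.pyGetD ((List.range cs.length).map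
      (fun i => PySem.Int.mod (0 + ((cs.take (i+1)).count '1' : Int)) 2)) (p.2 : Int) 0
      = PySem.Int.mod (((cs.take (p.2+1)).count '1' : Int)) 2 := by
    rw [PySem.List.pyGetD_of_nonneg] <;> simp [hlt]
  rw [hgd, PySem.List.slice_to_natCast]
  by_cases hc : p.1 = '1'
  · simp [hc]
  · have htake : (cs.take (p.2+1)).count '1' = (cs.take p.2).count '1' := by
      rw [List.take_succ_eq_append_getElem hlt, List.count_append, hpe]
      simp [hc]
    rw [PySem.Int.mod_eq_emod_of_pos (by norm_num)]
    simp only [htake, decide_eq_decide, hc, ne_eq, not_false_eq_true, true_and]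
    omega

-- ===== VERDICT (by name: the statement is the Claim_ definition above) =====
theorem solution_spec : Claim_equal_solution := by
  unfold Claim_equal_solution
  intro code _
  unfold Spec_solution solution solution_alt
  have h := solution_loop_inv code.toList code.toList.length le_rfl
  rw [List.take_length] at h
  simp only [PySem.List.len_eq, h, solution_filter_congr]
  cases (((code.toList.zipIdx).filter
      (fun p => p.1 ≠ '1' ∧ p.2 % 2 = (PySem.List.slice code.toList none (some (p.2 : Int))).count '1' % 2)).map Prod.fst) <;>
    simp
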